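-- pv_equiv track=rewrite | github.com/dimitrios-git/qpreserve | qpreserve/utils.py | _inject_ffmpeg_progress
-- ===== SOURCE A (Python) =====
-- from typing import Any, Dict, IO, List, Mapping, Optional, Sequence, cast
--
-- def _inject_ffmpeg_progress(cmd: Sequence[Any]) -> List[str]:
--     # Inject -progress pipe:1 -nostats before first "-i"
--     progress_cmd: List[str] = []
--     inserted = False
--     for token in cmd:
--         if not inserted and token == "-i":
--             progress_cmd += ["-progress", "pipe:1", "-nostats"]
--             inserted = True
--         progress_cmd.append(token)
--     return progress_cmd
-- ===== SOURCE B (Python) =====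
-- from typing import Any, List, Sequence
--
-- def _inject_ffmpeg_progress(cmd: Sequence[Any]) -> List[str]:
--     result = list(cmd)
--     if "-i" in result:
--         i = result.index("-i")
--         result[i:i] = ["-progress", "pipe:1", "-nostats"]
--     return result
-- ===== Notes on version B (the rewrite author's own statement) =====
-- stated objective: simpler
-- what changed: Replaces A's token-by-token append loop with an inserted flag by a copy of the list, a membership test for '-i', and a single slice-splice of the three flags at the first '-i' position.
import Mathlib
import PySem

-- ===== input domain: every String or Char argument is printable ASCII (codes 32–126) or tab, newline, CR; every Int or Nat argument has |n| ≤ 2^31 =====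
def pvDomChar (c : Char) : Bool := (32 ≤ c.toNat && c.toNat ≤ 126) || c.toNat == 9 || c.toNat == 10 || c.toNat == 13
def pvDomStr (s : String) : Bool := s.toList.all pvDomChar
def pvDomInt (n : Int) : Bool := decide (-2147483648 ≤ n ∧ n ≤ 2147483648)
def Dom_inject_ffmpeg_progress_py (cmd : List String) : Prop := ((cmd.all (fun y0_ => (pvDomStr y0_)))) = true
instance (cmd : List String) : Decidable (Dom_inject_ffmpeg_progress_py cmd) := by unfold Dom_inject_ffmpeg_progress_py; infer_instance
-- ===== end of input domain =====

-- B replaces A's single append loop (with an 'inserted' flag) by locate-then-splice: copy, membership test, index, slice insert. Objective: simpler.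
-- ===== PORT A =====
def inject_ffmpeg_progress_py (cmd : List String) : List String :=
  (cmd.foldl (fun (st : List String × Bool) token =>
      let st' := if !st.2 && token == "-i"
        then (st.1 ++ ["-progress", "pipe:1", "-nostats"], true)
        else st
      (st'.1 ++ [token], st'.2))
    ([], false)).1

-- ===== PORT B =====
def inject_ffmpeg_progress_py_alt (cmd : List String) : List String :=
  let result := cmd
  if result.contains "-i" then
    let i := result.idxOf "-i"
    result.take i ++ ["-progress", "pipe:1", "-nostats"] ++ result.drop i
  else
    result

-- ===== PRECONDITION & SPEC =====
def Spec_inject_ffmpeg_progress_py (cmd : List String) (out : List String) : Prop := out = inject_ffmpeg_progress_py_alt cmd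
instance (cmd : List String) (out : List String) : Decidable (Spec_inject_ffmpeg_progress_py cmd out) := by unfold Spec_inject_ffmpeg_progress_py; infer_instance

-- ===== CLAIM (what is proved, stated in full; the proofs are below) =====
def Claim_equal_inject_ffmpeg_progress_py : Prop := ∀ (cmd : List String), Dom_inject_ffmpeg_progress_py cmd → Spec_inject_ffmpeg_progress_py cmd (inject_ffmpeg_progress_py cmd)

-- ===== LEMMAS AND PROOFS =====
def pvStep : (List String × Bool) → String → (List String × Bool) :=
  fun st token =>
    let st' := if !st.2 && token == "-i"
      then (st.1 ++ ["-progress", "pipe:1", "-nostats"], true)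
      else st
    (st'.1 ++ [token], st'.2)
-- the accumulator factors out of A's fold
theorem pvFold_acc (cmd : List String) : ∀ (acc : List String) (b : Bool),
    List.foldl pvStep (acc, b) cmd
      = (acc ++ (List.foldl pvStep ([], b) cmd).1, (List.foldl pvStep ([], b) cmd).2) := by
  induction cmd with
  | nil => intro acc b; simp
  | cons t ts ih =>
    intro acc b
    rcases hp : pvStep ([], b) t with ⟨a1, b1⟩
    have hstep : pvStep (acc, b) t = (acc ++ a1, b1) := by
      simp only [pvStep] at hp ⊢
      split_ifs at hp ⊢ with h
      · simp at hp; simp [hp.1, hp.2]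
      · simp at hp; simp [hp.1, hp.2]
    simp only [List.foldl_cons, hstep, hp]
    rw [ih (acc ++ a1) b1, ih a1 b1]
    simp

-- once inserted, the fold just appends each token
theorem pvFold_true (cmd : List String) :
    (List.foldl pvStep ([], true) cmd).1 = cmd := by
  induction cmd with
  | nil => rfl
  | cons t ts ih =>
    have hstep : pvStep ([], true) t = ([t], true) := by
      simp [pvStep]
    simp only [List.foldl_cons, hstep]
    rw [pvFold_acc ts [t] true]
    simpa using ih

theorem inject_ffmpeg_progress_py_spec : Claim_equal_inject_ffmpeg_progress_py := by
  intro cmd hd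
  clear hd
  unfold Spec_inject_ffmpeg_progress_py
  show (List.foldl pvStep ([], false) cmd).1 = inject_ffmpeg_progress_py_alt cmd
  induction cmd with
  | nil => rfl
  | cons t ts ih =>
    by_cases ht : t = "-i"
    · subst ht
      have hstep : pvStep ([], false) "-i" = (["-progress", "pipe:1", "-nostats", "-i"], true) := by
        simp [pvStep]
      simp only [List.foldl_cons, hstep]
      rw [pvFold_acc ts ["-progress", "pipe:1", "-nostats", "-i"] true]
      simp [pvFold_true, inject_ffmpeg_progress_py_alt]
    · have hstep : pvStep ([], false) t = ([t], false) := by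
        simp [pvStep, ht]
      simp only [List.foldl_cons, hstep]
      rw [pvFold_acc ts [t] false]
      simp only [List.cons_append, List.nil_append]
      rw [ih]
      have hne : ("-i" == t) = false := by
        simp only [beq_eq_false_iff_ne, ne_eq]
        exact fun hc => ht hc.symm
      unfold inject_ffmpeg_progress_py_alt
      simp only [List.contains_cons, hne, Bool.false_or]
      by_cases hc : ts.contains "-i" = true
      · rw [if_pos hc, if_pos hc]
        have ht2 : (t == "-i") = false := by
          simp only [beq_eq_false_iff_ne, ne_eq]; exact ht
        simp [List.idxOf_cons, ht2]
      · rw [if_neg hc, if_neg hc]
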